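-- pv_equiv track=rewrite | github.com/udinilya/algopracticum | 4_алгоритмы_продолжение/01_бинарные_числа.py | solution
-- ===== SOURCE A (Python) =====
-- def solution(n):
--     if n == 1:
--         return ['0']
--     else:
--         res = list(solution(n - 1))
--         row = ''
--         for j in res[-1]:
--             if j == '0':
--                 row += '01'
--             elif j == '1':
--                 row += '10'
--         res.append(row)
--
--     return res
-- ===== SOURCE B (Python) =====
-- def solution(n):
--     # Iterative builder: single forward pass maintaining the growing list of rows.
--     res = ['0']
--     for _ in range(n - 1):
--         prev = res[-1]
--         res.append(''.join('01' if c == '0' else '10' for c in prev))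
--     return res
-- ===== Notes on version B (the rewrite author's own statement) =====
-- stated objective: idiomatic
-- what changed: Replaces the top-down recursion that copies the whole result list at every level with a single forward loop that appends the next row built from the current last row.
import Mathlib
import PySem

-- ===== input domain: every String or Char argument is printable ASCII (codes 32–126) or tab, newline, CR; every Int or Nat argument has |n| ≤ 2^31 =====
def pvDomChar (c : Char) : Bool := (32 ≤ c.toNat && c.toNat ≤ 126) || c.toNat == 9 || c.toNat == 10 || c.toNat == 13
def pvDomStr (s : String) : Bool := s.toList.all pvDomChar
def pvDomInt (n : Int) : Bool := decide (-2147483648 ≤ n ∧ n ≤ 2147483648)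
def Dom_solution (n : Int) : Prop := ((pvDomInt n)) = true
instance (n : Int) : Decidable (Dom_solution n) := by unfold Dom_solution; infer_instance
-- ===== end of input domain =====

-- B replaces A's top-down recursion (which copies the result list at each level) by a
-- single forward loop appending the next row; same rows, same order (objective: idiomatic).


-- ===== PORT A =====
-- row building: for j in res[-1]: row += '01' / '10' (strings handled as List Char;
-- the loop is ported as structural recursion over the characters, in order)
def rowA : List Char → List Char
  | [] => []
  | j :: t =>
    (if j = '0' then ['0', '1']
     else if j = '1' then ['1', '0']
     else []) ++ rowA t

def solution (n : Int) : List String :=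
  if n = 1 then ["0"]
  else if n < 1 then []  -- totality guard: Python recurses forever here (outside Pre_)
  else
    let res := solution (n - 1)
    res ++ [String.ofList (rowA (PySem.List.pyGetD res (-1) "").toList)]
termination_by n.toNat
decreasing_by omega

-- ===== PORT B =====
-- ''.join('01' if c == '0' else '10' for c in prev)
def rowB (s : List Char) : List Char :=
  (s.map (fun c => if c = '0' then ['0', '1'] else ['1', '0'])).flatten

def stepB (res : List String) (_ : Nat) : List String :=
  res ++ [String.ofList (rowB (PySem.List.pyGetD res (-1) "").toList)]

def solution_alt (n : Int) : List String :=
  (List.range (n - 1).toNat).foldl stepB ["0"]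

-- ===== PRECONDITION & SPEC =====
-- Pre_ excludes n ≤ 0, where Python A recurses without a base case (RecursionError).
def Pre_solution (n : Int) : Prop := 1 ≤ n
instance (n : Int) : Decidable (Pre_solution n) := by unfold Pre_solution; infer_instance
def pvWitness_solution : Int := (3)

def Spec_solution (n : Int) (out : List String) : Prop := out = solution_alt n
instance (n : Int) (out : List String) : Decidable (Spec_solution n out) := by unfold Spec_solution; infer_instance

-- ===== CLAIM (what is proved, stated in full; the proofs are below) =====
def Claim_equal_solution : Prop := ∀ (n : Int), Dom_solution n → Pre_solution n → Spec_solution n (solution n)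

-- ===== LEMMAS AND PROOFS =====

def BinaryStr (s : String) : Prop := ∀ c ∈ s.toList, c = '0' ∨ c = '1'

lemma rowB_binary (s : List Char) : ∀ c ∈ rowB s, c = '0' ∨ c = '1' := by
  intro c hc
  simp only [rowB, List.mem_flatten, List.mem_map] at hc
  obtain ⟨l, ⟨d, _, rfl⟩, hcl⟩ := hc
  by_cases h : d = '0' <;> simp [h] at hcl <;> tauto

lemma rowA_eq_rowB (s : List Char) (h : ∀ c ∈ s, c = '0' ∨ c = '1') :
    rowA s = rowB s := by
  induction s with
  | nil => rfl
  | cons c cs ih =>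
    have hc := h c (by simp)
    have ih' := ih (fun x hx => h x (by simp [hx]))
    rcases hc with hc | hc <;> simp [rowA, rowB, hc, ih']

def altAux (k : Nat) : List String := (List.range k).foldl stepB ["0"]

lemma altAux_succ (k : Nat) : altAux (k + 1) = stepB (altAux k) k := by
  simp [altAux, List.range_succ]

lemma altAux_invariant (k : Nat) :
    solution ((k : Int) + 1) = altAux k ∧ altAux k ≠ [] ∧ ∀ s ∈ altAux k, BinaryStr s := by
  induction k with
  | zero =>
    refine ⟨by simp [solution, altAux], by simp [altAux], ?_⟩
    intro s hs
    simp [altAux] at hs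
    intro c hc
    simp [hs] at hc
    simp [hc]
  | succ k ih =>
    obtain ⟨hsol, hne, hbin⟩ := ih
    have hlen : 0 < (altAux k).length := List.length_pos_iff.mpr hne
    have hin : PySem.Raise.InRange (altAux k).length (-1) := by
      unfold PySem.Raise.InRange; omega
    have hlast : PySem.List.pyGetD (altAux k) (-1) "" ∈ altAux k :=
      PySem.List.pyGetD_mem _ "" hin
    have hlastbin : BinaryStr (PySem.List.pyGetD (altAux k) (-1) "") := hbin _ hlast
    have hrow : rowA (PySem.List.pyGetD (altAux k) (-1) "").toList
        = rowB (PySem.List.pyGetD (altAux k) (-1) "").toList :=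
      rowA_eq_rowB _ hlastbin
    have hsolstep : solution ((↑(k + 1) : Int) + 1)
        = altAux k ++ [String.ofList (rowA (PySem.List.pyGetD (altAux k) (-1) "").toList)] := by
      rw [solution]
      have h1 : ¬ ((↑(k + 1) : Int) + 1 = 1) := by push_cast; omega
      have h2 : ¬ ((↑(k + 1) : Int) + 1 < 1) := by push_cast; omega
      have h3 : (↑(k + 1) : Int) + 1 - 1 = (k : Int) + 1 := by push_cast; ring
      simp only [h1, h2, if_false, h3, hsol]
    refine ⟨?_, ?_, ?_⟩
    · rw [hsolstep, altAux_succ, stepB, hrow]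
    · rw [altAux_succ, stepB]; simp
    · rw [altAux_succ, stepB]
      intro s hs
      rcases List.mem_append.mp hs with hs | hs
      · exact hbin s hs
      · simp at hs
        subst hs
        intro c hc
        exact rowB_binary _ c (by simpa using hc)

-- ===== VERDICT (by name: the statement is the Claim_ definition above) =====
theorem solution_spec : Claim_equal_solution := by
  intro n _ hpre
  unfold Spec_solution solution_alt
  have hk : n = ((n - 1).toNat : Int) + 1 := by unfold Pre_solution at hpre; omega
  have := (altAux_invariant (n - 1).toNat).1
  rw [hk]
  simpa [altAux] using this
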